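-- pv_equiv track=rewrite | github.com/jonathanMLDev/cppa-unified-dashboard_01 | BoostDepth/make-dependency.py | calculate_ancestor_descendant_layers
-- ===== SOURCE A (Python) =====
-- def calculate_ancestor_descendant_layers(seed, nodes, edges):
--     """Calculate ancestor and descendant layers from seed node."""
--     from collections import defaultdict, deque
--
--     # Build forward and reverse adjacency lists
--     forward_adj = defaultdict(set)
--     reverse_adj = defaultdict(set)
--     for u, v in edges:
--         forward_adj[u].add(v)
--         reverse_adj[v].add(u)
--
--     # Calculate descendant layers (what seed depends on - dependencies)
--     descendant_layers = defaultdict(set)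
--     visited_desc = set()
--     queue_desc = deque([(seed, 0)])
--
--     while queue_desc:
--         node, layer = queue_desc.popleft()
--         if node in visited_desc:
--             continue
--         visited_desc.add(node)
--
--         if layer > 0:  # Don't include seed in descendant layers
--             descendant_layers[layer].add(node)
--
--         # Add dependencies to next layer
--         for dep in forward_adj[node]:
--             if dep not in visited_desc:
--                 queue_desc.append((dep, layer + 1))
--
--     # Calculate ancestor layers (what depends on seed - dependents)
--     ancestor_layers = defaultdict(set)
--     visited_anc = set()
--     queue_anc = deque([(seed, 0)])
--
--     while queue_anc:
--         node, layer = queue_anc.popleft()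
--         if node in visited_anc:
--             continue
--         visited_anc.add(node)
--
--         if layer > 0:  # Don't include seed in ancestor layers
--             ancestor_layers[layer].add(node)
--
--         # Add dependents to next layer
--         for dep in reverse_adj[node]:
--             if dep not in visited_anc:
--                 queue_anc.append((dep, layer + 1))
--
--     return ancestor_layers, descendant_layers
-- ===== SOURCE B (Python) =====
-- def calculate_ancestor_descendant_layers(seed, nodes, edges):
--     """Calculate ancestor and descendant layers from seed node."""
--     from collections import defaultdict
--
--     forward_adj = defaultdict(set)
--     reverse_adj = defaultdict(set)
--     for u, v in edges:
--         forward_adj[u].add(v)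
--         reverse_adj[v].add(u)
--
--     def closure_layers(adj):
--         # Naive fixpoint iteration of the one-step reachability operator:
--         # reach_{k+1} = reach_k U N(reach_k); layer k+1 = reach_{k+1} \ reach_k.
--         # A node's shortest distance from the seed is exactly the iteration at
--         # which it first enters the closure, so these differences are the BFS layers.
--         layers = defaultdict(set)
--         reach = [seed]
--         k = 0
--         while True:
--             k += 1
--             new_reach = list(reach)
--             for x in reach:
--                 for y in adj.get(x, ()):
--                     if y not in new_reach:
--                         new_reach.append(y)
--             if len(new_reach) == len(reach):
--                 break
--             layers[k] = set(new_reach[len(reach):])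
--             reach = new_reach
--         return layers
--
--     return closure_layers(reverse_adj), closure_layers(forward_adj)
-- ===== Notes on version B (the rewrite author's own statement) =====
-- stated objective: alternative
-- what changed: Replaces each of A's (node,layer)-tagged deque BFS traversals with naive fixpoint iteration of the one-step reachability operator: repeatedly rescan the whole reachability list, append newly reachable nodes, and record each iteration's newly appended suffix as that layer (layer k = reach_k \ reach_{k-1}); no queue, no frontier, no per-node visited bookkeeping.
import Mathlib
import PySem

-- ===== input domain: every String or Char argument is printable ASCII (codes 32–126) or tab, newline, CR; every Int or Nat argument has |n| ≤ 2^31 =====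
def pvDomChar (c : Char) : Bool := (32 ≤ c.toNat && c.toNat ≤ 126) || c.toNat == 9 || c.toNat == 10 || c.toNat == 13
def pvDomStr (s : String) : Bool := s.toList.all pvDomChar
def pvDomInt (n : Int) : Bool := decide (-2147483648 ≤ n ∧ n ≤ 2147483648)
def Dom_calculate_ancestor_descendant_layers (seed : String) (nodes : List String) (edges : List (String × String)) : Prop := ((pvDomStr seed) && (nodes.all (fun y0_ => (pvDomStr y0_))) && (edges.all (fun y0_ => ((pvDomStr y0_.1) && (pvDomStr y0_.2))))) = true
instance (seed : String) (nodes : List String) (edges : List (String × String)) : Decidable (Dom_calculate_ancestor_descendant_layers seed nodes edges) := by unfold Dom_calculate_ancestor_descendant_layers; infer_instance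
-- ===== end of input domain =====

-- B replaces A's (node, layer)-tagged deque BFS by naive fixpoint iteration of the
-- one-step reachability operator (layer k = reach_k \ reach_{k-1}); same return value,
-- a different algorithm with no queue or frontier (objective: alternative).

-- ===== PORT A =====
-- shared by both ports: the adjacency-building loop 'for u, v in edges' (identical in Source A and Source B)
def pvBuildAdjs (edges : List (String × String)) :
    PySem.Dict String (PySem.Set String) × PySem.Dict String (PySem.Set String) :=
  edges.foldl (fun ad e =>
      (ad.1.insert e.1 (PySem.Set.add (ad.1.getD e.1 PySem.Set.empty) e.2),
       ad.2.insert e.2 (PySem.Set.add (ad.2.getD e.2 PySem.Set.empty) e.1)))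
    (PySem.Dict.empty, PySem.Dict.empty)

-- A's 'while queue_desc/queue_anc' loop; fuel (edges.length + 1) bounds the number of pops
-- (each visit appends at most its adjacency-set size, so pops ≤ 1 + Σ|adj values| ≤ 1 + |edges|);
-- the 0-fuel clause is a totality guard only, never reached from the port's call.
def pvBfsA (adj : PySem.Dict String (PySem.Set String)) :
    Nat → PySem.Dict Int (PySem.Set String) → PySem.Set String → List (String × Int) →
    PySem.Dict Int (PySem.Set String)
  | _, layers, _, [] => layers
  | 0, layers, _, _ :: _ => layers
  | fuel + 1, layers, vis, (node, layer) :: rest =>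
    if PySem.Set.contains vis node then pvBfsA adj fuel layers vis rest
    else
      let vis' := PySem.Set.add vis node
      let layers' := if layer > 0 then layers.insert layer (PySem.Set.add (layers.getD layer PySem.Set.empty) node) else layers
      pvBfsA adj fuel layers' vis'
        (rest ++ ((adj.getD node PySem.Set.empty).filter (fun d => !(PySem.Set.contains vis' d))).map (fun d => (d, layer + 1)))

def calculate_ancestor_descendant_layers (seed : String) (nodes : List String) (edges : List (String × String)) : (List (Int × List String)) × (List (Int × List String)) :=
  let adjs := pvBuildAdjs edges
  let desc := pvBfsA adjs.1 (edges.length + 1) PySem.Dict.empty PySem.Set.empty [(seed, 0)]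
  let anc := pvBfsA adjs.2 (edges.length + 1) PySem.Dict.empty PySem.Set.empty [(seed, 0)]
  (anc.items, desc.items)

-- ===== PORT B =====
-- B's 'while True' closure loop (Source B closure_layers): each iteration rebuilds the
-- reachability list by scanning ALL of reach and records the newly appended suffix as a
-- layer; fuel (edges.length + 2) bounds the iterations (each non-final one discovers
-- ≥ 1 new node, and ≤ |edges| nodes are discoverable); 0-fuel clause is a guard only.
def pvClosure (adj : PySem.Dict String (PySem.Set String)) :
    Nat → PySem.Dict Int (PySem.Set String) → List String → Int →
    PySem.Dict Int (PySem.Set String)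
  | 0, layers, _, _ => layers
  | fuel + 1, layers, reach, k =>
    let nr := reach.foldl (fun nr x =>
        (adj.getD x PySem.Set.empty).foldl
          (fun nr2 y => if nr2.contains y then nr2 else nr2 ++ [y]) nr) reach
    if nr.length == reach.length then layers
    else pvClosure adj fuel (layers.insert (k + 1) (PySem.Set.ofList (nr.drop reach.length))) nr (k + 1)

def calculate_ancestor_descendant_layers_alt (seed : String) (nodes : List String) (edges : List (String × String)) : (List (Int × List String)) × (List (Int × List String)) :=
  let adjs := pvBuildAdjs edges
  ((pvClosure adjs.2 (edges.length + 2) PySem.Dict.empty [seed] 0).items,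
   (pvClosure adjs.1 (edges.length + 2) PySem.Dict.empty [seed] 0).items)

-- ===== PRECONDITION & SPEC =====
def Spec_calculate_ancestor_descendant_layers (seed : String) (nodes : List String) (edges : List (String × String)) (out : (List (Int × List String)) × (List (Int × List String))) : Prop := out = calculate_ancestor_descendant_layers_alt seed nodes edges
instance (seed : String) (nodes : List String) (edges : List (String × String)) (out : (List (Int × List String)) × (List (Int × List String))) : Decidable (Spec_calculate_ancestor_descendant_layers seed nodes edges out) := by unfold Spec_calculate_ancestor_descendant_layers; infer_instance

-- ===== CLAIM (what is proved, stated in full; the proofs are below) =====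
def Claim_equal_calculate_ancestor_descendant_layers : Prop := ∀ (seed : String) (nodes : List String) (edges : List (String × String)), Dom_calculate_ancestor_descendant_layers seed nodes edges → Spec_calculate_ancestor_descendant_layers seed nodes edges (calculate_ancestor_descendant_layers seed nodes edges)

-- ===== LEMMAS AND PROOFS =====

-- `fdd vis q`: first occurrences in q of elements not in vis (BFS first-discovery order)
def fdd (vis : List String) : List String → List String
  | [] => []
  | x :: q => if x ∈ vis then fdd vis q else x :: fdd (vis ++ [x]) q

-- the raw list A appends to its queue while popping the entries q (all tagged with one layer)
def apps (adj : PySem.Dict String (PySem.Set String)) (vis : List String) : List String → List String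
  | [] => []
  | x :: q => if x ∈ vis then apps adj vis q
      else (adj.getD x PySem.Set.empty).filter (fun d => !((vis ++ [x]).contains d)) ++ apps adj (vis ++ [x]) q

-- the layer-dict update A performs while popping one layer
def layersUpd (L : Int) (ly : PySem.Dict Int (PySem.Set String)) (xs : List String) : PySem.Dict Int (PySem.Set String) :=
  xs.foldl (fun d x => d.insert L (PySem.Set.add (d.getD L PySem.Set.empty) x)) ly

def vsum (l : List (String × PySem.Set String)) : Nat := (l.map (fun kv => kv.2.length)).sum

-- A-side potential: total adjacency mass still reachable (bounds future queue appends)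
def potA (adj : PySem.Dict String (PySem.Set String)) (vis : List String) : Nat :=
  vsum (adj.items.filter (fun kv => !(vis.contains kv.1)))

-- B-side potential: number of distinct discoverable nodes not yet reached
def potB (adj : PySem.Dict String (PySem.Set String)) (vis : List String) : Nat :=
  ((PySem.Set.ofList adj.values.flatten).filter (fun x => !(vis.contains x))).length

lemma fdd_mem : ∀ {q vis : List String} {y : String}, y ∈ fdd vis q → y ∈ q ∧ y ∉ vis := by
  intro q
  induction q with
  | nil => intro vis y h; simp [fdd] at h
  | cons x q ih =>
    intro vis y h
    simp only [fdd] at h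
    by_cases hx : x ∈ vis
    · simp only [hx, if_true] at h
      rcases ih h with ⟨h1, h2⟩
      exact ⟨List.mem_cons_of_mem _ h1, h2⟩
    · simp only [hx, if_false, List.mem_cons] at h
      rcases h with rfl | h
      · exact ⟨List.mem_cons_self, hx⟩
      · rcases ih h with ⟨h1, h2⟩
        simp at h2
        exact ⟨List.mem_cons_of_mem _ h1, h2.1⟩

lemma fdd_nodup : ∀ (q vis : List String), (fdd vis q).Nodup := by
  intro q
  induction q with
  | nil => intro vis; simp [fdd]
  | cons x q ih =>
    intro vis
    simp only [fdd]
    by_cases hx : x ∈ vis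
    · simp only [hx, if_true]; exact ih vis
    · simp only [hx, if_false, List.nodup_cons]
      refine ⟨fun hm => ?_, ih _⟩
      have := (fdd_mem hm).2
      simp at this

lemma fdd_all_vis : ∀ {q vis : List String}, fdd vis q = [] → ∀ x ∈ q, x ∈ vis := by
  intro q
  induction q with
  | nil => simp
  | cons x q ih =>
    intro vis h y hy
    simp only [fdd] at h
    by_cases hx : x ∈ vis
    · rcases List.mem_cons.1 hy with rfl | hy'
      · exact hx
      · exact ih (by simpa [hx] using h) y hy'
    · simp [hx] at h

lemma fdd_nil_of_subset : ∀ {q vis : List String}, (∀ x ∈ q, x ∈ vis) → fdd vis q = [] := by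
  intro q
  induction q with
  | nil => intro vis _; rfl
  | cons x q ih =>
    intro vis h
    have hx : x ∈ vis := h x List.mem_cons_self
    simp only [fdd, hx, if_true]
    exact ih fun y hy => h y (List.mem_cons_of_mem _ hy)

lemma fdd_covers : ∀ {q vis : List String} {y : String}, y ∈ q → y ∈ vis ∨ y ∈ fdd vis q := by
  intro q
  induction q with
  | nil => intro vis y h; simp at h
  | cons x q ih =>
    intro vis y h
    simp only [fdd]
    by_cases hx : x ∈ vis
    · simp only [hx, if_true]
      rcases List.mem_cons.1 h with rfl | h'
      · exact Or.inl hx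
      · exact ih h'
    · simp only [hx, if_false]
      rcases List.mem_cons.1 h with rfl | h'
      · exact Or.inr List.mem_cons_self
      · rcases ih (vis := vis ++ [x]) h' with hv | hf
        · rcases List.mem_append.1 hv with hv | hv
          · exact Or.inl hv
          · exact Or.inr (by simp at hv; simp [hv])
        · exact Or.inr (List.mem_cons_of_mem _ hf)

lemma fdd_append : ∀ (a vis b : List String),
    fdd vis (a ++ b) = fdd vis a ++ fdd (vis ++ fdd vis a) b := by
  intro a
  induction a with
  | nil => intro vis b; simp [fdd]
  | cons x a ih =>
    intro vis b
    simp only [List.cons_append, fdd]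
    by_cases hx : x ∈ vis
    · simp [hx, ih]
    · simp only [hx, if_false, ih, List.cons_append]
      congr 2
      simp [List.append_assoc]

lemma fdd_filter : ∀ {l vis : List String} {p : String → Bool},
    (∀ x ∈ l, p x = false → x ∈ vis) → fdd vis (l.filter p) = fdd vis l := by
  intro l
  induction l with
  | nil => intro vis p _; rfl
  | cons x l ih =>
    intro vis p h
    by_cases hp : p x
    · simp only [List.filter_cons, hp, if_true, fdd]
      by_cases hx : x ∈ vis
      · simp only [hx, if_true]; exact ih fun y hy hpy => h y (List.mem_cons_of_mem _ hy) hpy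
      · simp only [hx, if_false]
        congr 1
        exact ih fun y hy hpy => List.mem_append_left _ (h y (List.mem_cons_of_mem _ hy) hpy)
    · have hx : x ∈ vis := h x List.mem_cons_self (by simpa using hp)
      simp only [List.filter_cons, hp]
      simp only [Bool.false_eq_true, if_false, fdd, hx, if_true]
      exact ih fun y hy hpy => h y (List.mem_cons_of_mem _ hy) hpy


lemma apps_nil {adj : PySem.Dict String (PySem.Set String)} :
    ∀ {q vis : List String}, (∀ x ∈ q, x ∈ vis) → apps adj vis q = [] := by
  intro q
  induction q with
  | nil => intro vis _; rfl
  | cons x q ih =>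
    intro vis h
    simp only [apps, h x List.mem_cons_self, if_true]
    exact ih fun y hy => h y (List.mem_cons_of_mem _ hy)

lemma appsLink (adj : PySem.Dict String (PySem.Set String)) :
    ∀ (q vis W : List String), (∀ y, y ∈ vis ++ fdd vis q → y ∈ W) →
    fdd W (apps adj vis q) = fdd W ((fdd vis q).flatMap (fun g => adj.getD g PySem.Set.empty)) := by
  intro q
  induction q with
  | nil => intro vis W _; rfl
  | cons x q ih =>
    intro vis W hW
    by_cases hx : x ∈ vis
    · simp only [apps, fdd, hx, if_true] at *
      exact ih vis W hW
    · simp only [apps, fdd, hx, if_false] at *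
      rw [fdd_append, List.flatMap_cons, fdd_append]
      have hxW : x ∈ W := hW x (by simp)
      have h1 : fdd W ((adj.getD x PySem.Set.empty).filter (fun d => !((vis ++ [x]).contains d)))
          = fdd W (adj.getD x PySem.Set.empty) := by
        apply fdd_filter
        intro y _ hy
        simp only [Bool.not_eq_false', List.contains_eq_mem, decide_eq_true_eq, List.mem_append,
          List.mem_singleton] at hy
        rcases hy with hy | rfl
        · exact hW y (List.mem_append_left _ hy)
        · exact hxW
      rw [h1]
      congr 1
      apply ih
      intro y hy
      rcases List.mem_append.1 hy with hy | hy
      · rcases List.mem_append.1 hy with hy | hy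
        · exact List.mem_append_left _ (hW y (List.mem_append_left _ hy))
        · rcases List.mem_singleton.1 hy with rfl
          exact List.mem_append_left _ hxW
      · exact List.mem_append_left _ (hW y (List.mem_append_right _ (by simp [hy])))

-- B's inner 'for y in adj.get(x, ())' membership-append fold adds exactly the first discoveries
lemma cfoldInner (acc : List String) (l : List String) :
    l.foldl (fun nr2 y => if nr2.contains y then nr2 else nr2 ++ [y]) acc = acc ++ fdd acc l := by
  induction l generalizing acc with
  | nil => simp [fdd]
  | cons n l ih =>
    rw [List.foldl_cons]
    by_cases hn : n ∈ acc
    · have hstep : (if acc.contains n then acc else acc ++ [n]) = acc := by simp [hn]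
      rw [hstep, ih, fdd]
      simp [hn]
    · have hstep : (if acc.contains n then acc else acc ++ [n]) = acc ++ [n] := by simp [hn]
      rw [hstep, ih, fdd]
      simp only [hn, if_false]
      rw [List.append_cons acc n (fdd (acc ++ [n]) l)]

-- B's outer 'for x in reach' fold appends the first discoveries among all neighbours
lemma cfoldOuter (adj : PySem.Dict String (PySem.Set String)) :
    ∀ (l acc : List String),
    l.foldl (fun nr x => (adj.getD x PySem.Set.empty).foldl
        (fun nr2 y => if nr2.contains y then nr2 else nr2 ++ [y]) nr) acc =
    acc ++ fdd acc (l.flatMap (fun g => adj.getD g PySem.Set.empty)) := by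
  intro l
  induction l with
  | nil => intro acc; simp [fdd]
  | cons g l ih =>
    intro acc
    rw [List.foldl_cons, cfoldInner, ih, List.flatMap_cons, fdd_append]
    simp [List.append_assoc]


lemma innerA (adj : PySem.Dict String (PySem.Set String)) {L : Int} (hL : 0 < L) :
    ∀ (q : List String) (fuel : Nat) (ly : PySem.Dict Int (PySem.Set String)) (vis app : List String),
    pvBfsA adj (q.length + fuel) ly vis (q.map (fun x => (x, L)) ++ app.map (fun x => (x, L + 1))) =
    pvBfsA adj fuel (layersUpd L ly (fdd vis q)) (vis ++ fdd vis q)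
      ((app ++ apps adj vis q).map (fun x => (x, L + 1))) := by
  intro q
  induction q with
  | nil => intro fuel ly vis app; simp [fdd, apps, layersUpd]
  | cons x q ih =>
    intro fuel ly vis app
    have hlen : (x :: q).length + fuel = (q.length + fuel) + 1 := by
      simp [List.length_cons]; omega
    rw [hlen]
    simp only [List.map_cons, List.cons_append, pvBfsA]
    by_cases hx : x ∈ vis
    · simp only [PySem.Set.contains_eq_listContains, List.contains_eq_mem, hx, decide_true, if_true]
      rw [ih fuel ly vis app]
      simp [fdd, apps, hx]
    · simp only [PySem.Set.contains_eq_listContains, List.contains_eq_mem, hx, decide_false,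
        Bool.false_eq_true, if_false]
      rw [if_pos hL, PySem.Set.add_of_not_mem hx]
      rw [List.append_assoc, ← List.map_append]
      rw [ih fuel _ _ (app ++ _)]
      simp only [fdd, apps, hx, if_false, layersUpd, List.foldl_cons,
        PySem.Set.contains_eq_listContains, List.contains_eq_mem, List.append_assoc]
      rw [List.append_cons vis x (fdd (vis ++ [x]) q), List.append_assoc]


lemma insert_insert_same {κ ν : Type} [BEq κ] [LawfulBEq κ] (d : PySem.Dict κ ν) (k : κ) (v w : ν) :
    (d.insert k v).insert k w = d.insert k w := by
  apply PySem.Dict.ext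
  by_cases hc : d.contains k
  · rw [PySem.Dict.items_insert_of_contains _ _ (PySem.Dict.contains_insert_self d k v),
      PySem.Dict.items_insert_of_contains _ _ hc,
      PySem.Dict.items_insert_of_contains _ _ hc, List.map_map]
    apply List.map_congr_left
    intro p _
    by_cases hp : p.1 == k
    · simp [hp]
    · simp [hp]
  · have hk : k ∉ d.keys := fun hm => by
      simp [(PySem.Dict.contains_iff_mem_keys d k).2 hm] at hc
    rw [PySem.Dict.items_insert_of_contains _ _ (PySem.Dict.contains_insert_self d k v),
      PySem.Dict.items_insert_of_not_contains _ _ (by simpa using hc),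
      PySem.Dict.items_insert_of_not_contains _ _ (by simpa using hc),
      List.map_append]
    have : List.map (fun p => if (p.1 == k) = true then (k, w) else p) d.items = d.items := by
      rw [show d.items = d.items.map id by simp]
      rw [List.map_map]
      apply List.map_congr_left
      intro p hp
      have : p.1 ≠ k := by
        intro h
        exact hk (h ▸ List.mem_map_of_mem hp)
      simp [this]
    simp [this]

lemma layersUpd_eq (L : Int) :
    ∀ (xs : List String) (ly : PySem.Dict Int (PySem.Set String)) (s : PySem.Set String),
    ly.getD L PySem.Set.empty = s →
    xs.foldl (fun d x => d.insert L (PySem.Set.add (d.getD L PySem.Set.empty) x)) ly =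
      (if xs.isEmpty then ly else ly.insert L (xs.foldl PySem.Set.add s)) := by
  intro xs
  induction xs with
  | nil => intro ly s _; simp
  | cons x xs ih =>
    intro ly s hs
    have hg : (ly.insert L (PySem.Set.add (ly.getD L PySem.Set.empty) x)).getD L PySem.Set.empty = PySem.Set.add s x := by
      rw [PySem.Dict.getD_insert_self, hs]
    rw [List.foldl_cons, ih _ (PySem.Set.add s x) hg]
    cases xs with
    | nil =>
      simp only [List.isEmpty_nil, if_true, List.isEmpty_cons, Bool.false_eq_true, if_false,
        List.foldl_cons, List.foldl_nil]
      congr 1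
      rw [hs]
    | cons y ys =>
      simp only [List.isEmpty_cons, if_false, hs]
      rw [insert_insert_same]
      simp


lemma vsum_sublist {l l' : List (String × PySem.Set String)} (h : l.Sublist l') : vsum l ≤ vsum l' :=
  List.Sublist.sum_le_sum (List.Sublist.map _ h) (by simp)

lemma vsum_filter_mono (l : List (String × PySem.Set String)) {p q : String × PySem.Set String → Bool}
    (h : ∀ kv, p kv = true → q kv = true) : vsum (l.filter p) ≤ vsum (l.filter q) :=
  vsum_sublist (List.monotone_filter_right l h)

lemma potL_step : ∀ (l : List (String × PySem.Set String)) (vis : List String) (x : String), x ∉ vis →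
    vsum (l.filter (fun kv => !((vis ++ [x]).contains kv.1))) +
      ((PySem.Dict.mk l).getD x PySem.Set.empty).length ≤
    vsum (l.filter (fun kv => !(vis.contains kv.1))) := by
  intro l
  induction l with
  | nil =>
    intro vis x _
    have h0 : ((PySem.Dict.mk ([] : List (String × PySem.Set String))).getD x ([] : PySem.Set String)) = [] := rfl
    simp [h0, vsum]
  | cons kv l ih =>
    intro vis x hx
    obtain ⟨k, s⟩ := kv
    rw [PySem.Dict.getD_eq_get?_getD, PySem.Dict.get?_mk_cons]
    by_cases hk : k = x
    · subst hk
      have c1 : (!((vis ++ [k]).contains k)) = false := by simp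
      have c2 : (!(vis.contains k)) = true := by simp [hx]
      simp only [List.filter_cons, c1, c2, if_true, Bool.false_eq_true, if_false,
        beq_self_eq_true, Option.getD_some, vsum, List.map_cons, List.sum_cons]
      have := vsum_filter_mono (p := fun kv => !((vis ++ [k]).contains kv.1))
        (q := fun kv => !(vis.contains kv.1)) l (by
          intro kv h
          simp only [Bool.not_eq_eq_eq_not, Bool.not_true, List.contains_eq_mem,
            decide_eq_false_iff_not, List.mem_append, List.mem_singleton] at *
          tauto)
      unfold vsum at this
      omega
    · have c12 : (!((vis ++ [x]).contains k)) = (!(vis.contains k)) := by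
        simp [List.contains_eq_mem, hk]
      have hbeq : (k == x) = false := by simp [hk]
      rw [List.filter_cons, List.filter_cons, c12, hbeq]
      simp only [Bool.false_eq_true, if_false]
      have ihx := ih vis x hx
      rw [PySem.Dict.getD_eq_get?_getD] at ihx
      by_cases hc : (!(vis.contains k)) = true
      · simp only [hc, if_true, vsum, List.map_cons, List.sum_cons]
        unfold vsum at ihx
        omega
      · simp only [hc, Bool.false_eq_true, if_false] at *
        exact ihx


lemma getD_subset_flatten (adj : PySem.Dict String (PySem.Set String)) (g : String) :
    ∀ y ∈ adj.getD g PySem.Set.empty, y ∈ adj.values.flatten := by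
  intro y hy
  rw [PySem.Dict.getD_eq_get?_getD] at hy
  cases h : adj.get? g with
  | none => rw [h] at hy; simp [PySem.Set.empty] at hy
  | some v =>
    rw [h] at hy
    simp only [Option.getD_some] at hy
    have := PySem.Dict.mem_items_of_get?_eq_some adj h
    exact List.mem_flatten.2 ⟨v, List.mem_map_of_mem this, hy⟩

lemma potB_drop_list (U S vis : List String) (hU : U.Nodup) (hnd : S.Nodup)
    (hS : ∀ x ∈ S, x ∈ U ∧ x ∉ vis) :
    (U.filter (fun x => !((vis ++ S).contains x))).length + S.length ≤
    (U.filter (fun x => !(vis.contains x))).length := by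
  have h1 : U.filter (fun x => !((vis ++ S).contains x)) =
      (U.filter (fun x => !(vis.contains x))).filter (fun x => !(S.contains x)) := by
    rw [List.filter_filter]
    apply List.filter_congr
    intro x _
    by_cases h1 : x ∈ vis <;> by_cases h2 : x ∈ S <;> simp [h1, h2]
  have h2 : (U.filter (fun x => !(vis.contains x))).length =
      ((U.filter (fun x => !(vis.contains x))).filter (fun x => !(S.contains x))).length +
      ((U.filter (fun x => !(vis.contains x))).filter (fun x => S.contains x)).length := by
    rw [Nat.add_comm]
    have := List.length_eq_length_filter_add (l := U.filter (fun x => !(vis.contains x))) (fun x => S.contains x)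
    omega

  have h3 : S.length ≤ ((U.filter (fun x => !(vis.contains x))).filter (fun x => S.contains x)).length := by
    have hnodup := hnd
    have hsub : S ⊆ (U.filter (fun x => !(vis.contains x))).filter (fun x => S.contains x) := by
      intro x hx
      rcases hS x hx with ⟨h4, h5⟩
      simp only [List.mem_filter, List.contains_eq_mem]
      refine ⟨⟨h4, by simpa using h5⟩, by simpa using hx⟩
    calc S.length = S.toFinset.card := (List.toFinset_card_of_nodup hnodup).symm
      _ ≤ _ := Finset.card_le_card fun x hx => by
          simp only [List.mem_toFinset] at *; exact hsub hx
      _ ≤ _ := List.toFinset_card_le _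
  rw [h1]
  omega


lemma vsum_map_overwrite : ∀ (l : List (String × PySem.Set String)) (k : String) (w : PySem.Set String),
    (l.map Prod.fst).Nodup →
    (∀ s, (PySem.Dict.mk l).get? k = some s → w.length ≤ s.length + 1) →
    vsum (l.map (fun p => if p.1 == k then (k, w) else p)) ≤ vsum l + 1 := by
  intro l
  induction l with
  | nil => intro k w _ _; simp [vsum]
  | cons kv l ih =>
    intro k w hnd hw
    obtain ⟨a, s⟩ := kv
    simp only [List.map_cons, List.nodup_cons] at hnd
    by_cases ha : a = k
    · subst ha
      have hs := hw s (by rw [PySem.Dict.get?_mk_cons]; simp)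
      have htail : l.map (fun p => if p.1 == a then (a, w) else p) = l := by
        rw [show l = l.map id by simp]
        rw [List.map_map]
        apply List.map_congr_left
        intro p hp
        have : p.1 ≠ a := fun h => hnd.1 (h ▸ List.mem_map_of_mem hp)
        simp [this]
      simp only [List.map_cons, beq_self_eq_true, if_true, htail, vsum, List.map_cons, List.sum_cons]
      unfold vsum at *
      omega
    · have hbeq : (a == k) = false := by simp [ha]
      have ihx := ih k w hnd.2 (fun s' hs' => hw s' (by rw [PySem.Dict.get?_mk_cons]; simp [ha]; exact hs'))
      simp only [List.map_cons, hbeq, Bool.false_eq_true, if_false, vsum, List.sum_cons, List.map_cons]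
      unfold vsum at ihx
      omega

lemma vsum_insert_le (d : PySem.Dict String (PySem.Set String)) (k : String) (v : String)
    (hnd : d.keys.Nodup) :
    vsum ((d.insert k (PySem.Set.add (d.getD k PySem.Set.empty) v)).items) ≤ vsum d.items + 1 := by
  by_cases hc : d.contains k
  · rw [PySem.Dict.items_insert_of_contains _ _ hc]
    apply vsum_map_overwrite _ _ _ hnd
    intro s hs
    rw [PySem.Dict.getD_of_get?_eq_some _ _ hs]
    rw [PySem.Set.add_eq_ite]
    split
    · omega
    · simp
  · rw [PySem.Dict.items_insert_of_not_contains _ _ (by simpa using hc)]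
    rw [PySem.Dict.getD_of_not_contains _ _ (by simpa using hc)]
    simp [vsum, PySem.Set.add_eq_ite, PySem.Set.empty]


lemma potA_step (adj : PySem.Dict String (PySem.Set String)) {x : String} (vis : List String)
    (hx : x ∉ vis) : potA adj (vis ++ [x]) + (adj.getD x PySem.Set.empty).length ≤ potA adj vis := by
  obtain ⟨l⟩ := adj
  exact potL_step l vis x hx

lemma apps_len (adj : PySem.Dict String (PySem.Set String)) :
    ∀ (q vis : List String), (apps adj vis q).length + potA adj (vis ++ fdd vis q) ≤ potA adj vis := by
  intro q
  induction q with
  | nil =>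
    intro vis
    simp [apps, fdd]
  | cons x q ih =>
    intro vis
    by_cases hx : x ∈ vis
    · simpa [apps, fdd, hx] using ih vis
    · simp only [apps, fdd, hx, if_false]
      have h1 := ih (vis ++ [x])
      have h2 := potA_step adj vis hx
      have h3 : ((adj.getD x PySem.Set.empty).filter (fun d => !((vis ++ [x]).contains d))).length ≤
          (adj.getD x PySem.Set.empty).length := List.length_filter_le _ _
      rw [List.append_cons vis x (fdd (vis ++ [x]) q)]
      simp only [List.length_append]
      omega

lemma potB_drop (adj : PySem.Dict String (PySem.Set String)) {vis S : List String}
    (hnd : S.Nodup) (hS : ∀ x ∈ S, x ∈ adj.values.flatten ∧ x ∉ vis) :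
    potB adj (vis ++ S) + S.length ≤ potB adj vis := by
  apply potB_drop_list _ _ _ (PySem.Set.nodup_ofList _) hnd
  intro x hx
  rcases hS x hx with ⟨h1, h2⟩
  exact ⟨(PySem.Set.mem_ofList _ _).2 h1, h2⟩

lemma build_inv : ∀ (edges : List (String × String)) (d1 d2 : PySem.Dict String (PySem.Set String)),
    d1.keys.Nodup → d2.keys.Nodup →
    (edges.foldl (fun ad e =>
      (ad.1.insert e.1 (PySem.Set.add (ad.1.getD e.1 PySem.Set.empty) e.2),
       ad.2.insert e.2 (PySem.Set.add (ad.2.getD e.2 PySem.Set.empty) e.1))) (d1, d2)).1.keys.Nodup ∧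
    (edges.foldl (fun ad e =>
      (ad.1.insert e.1 (PySem.Set.add (ad.1.getD e.1 PySem.Set.empty) e.2),
       ad.2.insert e.2 (PySem.Set.add (ad.2.getD e.2 PySem.Set.empty) e.1))) (d1, d2)).2.keys.Nodup ∧
    vsum ((edges.foldl (fun ad e =>
      (ad.1.insert e.1 (PySem.Set.add (ad.1.getD e.1 PySem.Set.empty) e.2),
       ad.2.insert e.2 (PySem.Set.add (ad.2.getD e.2 PySem.Set.empty) e.1))) (d1, d2)).1.items) ≤ vsum d1.items + edges.length ∧
    vsum ((edges.foldl (fun ad e =>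
      (ad.1.insert e.1 (PySem.Set.add (ad.1.getD e.1 PySem.Set.empty) e.2),
       ad.2.insert e.2 (PySem.Set.add (ad.2.getD e.2 PySem.Set.empty) e.1))) (d1, d2)).2.items) ≤ vsum d2.items + edges.length := by
  intro edges
  induction edges with
  | nil => intro d1 d2 h1 h2; exact ⟨h1, h2, by simp, by simp⟩
  | cons e edges ih =>
    intro d1 d2 h1 h2
    rw [List.foldl_cons]
    have hv1 := vsum_insert_le d1 e.1 e.2 h1
    have hv2 := vsum_insert_le d2 e.2 e.1 h2
    rcases ih (d1.insert e.1 (PySem.Set.add (d1.getD e.1 PySem.Set.empty) e.2))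
        (d2.insert e.2 (PySem.Set.add (d2.getD e.2 PySem.Set.empty) e.1))
        (PySem.Dict.nodup_keys_insert _ _ _ h1) (PySem.Dict.nodup_keys_insert _ _ _ h2)
      with ⟨g1, g2, g3, g4⟩
    refine ⟨g1, g2, ?_, ?_⟩ <;> simp only [List.length_cons] <;> omega

-- the main simulation: A's tagged-queue loop against B's closure-iteration loop;
-- reach = pre ++ fr where fr is the newest layer and pre is closed under adj
lemma outer (adj : PySem.Dict String (PySem.Set String)) :
    ∀ (fB : Nat) (pre fr qRaw : List String) (ly : PySem.Dict Int (PySem.Set String)) (L : Int) (fA : Nat),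
    0 ≤ L →
    (∀ x ∈ pre, ∀ y ∈ adj.getD x PySem.Set.empty, y ∈ pre ++ fr) →
    fdd (pre ++ fr) qRaw = fdd (pre ++ fr) (fr.flatMap (fun g => adj.getD g PySem.Set.empty)) →
    (∀ k ∈ ly.keys, k ≤ L) →
    qRaw.length + potA adj (pre ++ fr) ≤ fA →
    2 + potB adj (pre ++ fr) ≤ fB →
    pvBfsA adj fA ly (pre ++ fr) (qRaw.map (fun x => (x, L + 1))) = pvClosure adj fB ly (pre ++ fr) L := by
  intro fB
  induction fB with
  | zero => intro pre fr qRaw ly L fA _ _ _ _ _ hfB; omega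
  | succ n ih =>
    intro pre fr qRaw ly L fA hL hcl hlink hKeys hfA hfB
    have hfuel : fA = qRaw.length + (fA - qRaw.length) := by omega
    have hLpos : (0 : Int) < L + 1 := by omega
    have hfresh : ly.getD (L + 1) PySem.Set.empty = PySem.Set.empty := by
      apply PySem.Dict.getD_of_not_contains
      cases hcon : ly.contains (L + 1) with
      | false => rfl
      | true =>
        have := hKeys _ ((PySem.Dict.contains_iff_mem_keys _ _).1 hcon)
        omega
    have hqnil : qRaw.map (fun x => (x, L + 1)) =
        qRaw.map (fun x => (x, L + 1)) ++ ([] : List String).map (fun x => (x, L + 1 + 1)) := by simp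
    set reach := pre ++ fr with hreach
    set N := fdd reach (fr.flatMap (fun g => adj.getD g PySem.Set.empty)) with hNdef
    conv_rhs => rw [pvClosure]
    rw [cfoldOuter]
    have hnr : fdd reach (reach.flatMap (fun g => adj.getD g PySem.Set.empty)) = N := by
      rw [hreach, List.flatMap_append, fdd_append]
      have hpre : fdd (pre ++ fr) (pre.flatMap (fun g => adj.getD g PySem.Set.empty)) = [] := by
        apply fdd_nil_of_subset
        intro y hy
        rcases List.mem_flatMap.1 hy with ⟨g, hg, hgy⟩
        exact hcl g hg y hgy
      rw [hpre, List.append_nil, List.nil_append]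
    rw [hnr]
    have hlencond : ((reach ++ N).length == reach.length) = N.isEmpty := by
      cases N with
      | nil => simp
      | cons a t =>
        simp only [List.isEmpty_cons, beq_iff_eq, List.length_append]
        simp
    rw [hlencond]
    by_cases hN0 : N.isEmpty
    · have hNnil : N = [] := by simpa using hN0
      have hall : ∀ x ∈ qRaw, x ∈ reach := fdd_all_vis (by rw [hlink]; exact hNnil)
      have happs : apps adj reach qRaw = [] := apps_nil hall
      rw [if_pos hN0]
      rw [hfuel, hqnil, innerA adj hLpos qRaw (fA - qRaw.length) ly reach []]
      have hfN : fdd reach qRaw = [] := by rw [hlink]; exact hNnil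
      rw [hfN, happs]
      simp only [layersUpd, List.foldl_nil, List.append_nil, List.nil_append, List.map_nil]
      cases (fA - qRaw.length) <;> rfl
    · have hNnil : N ≠ [] := by simpa [List.isEmpty_iff] using hN0
      rw [if_neg (by simpa using hN0)]
      have hdrop : (reach ++ N).drop reach.length = N := List.drop_left
      rw [hdrop]
      rw [hfuel, hqnil, innerA adj hLpos qRaw (fA - qRaw.length) ly reach [], hlink]
      simp only [layersUpd]
      rw [layersUpd_eq (L + 1) N ly PySem.Set.empty hfresh]
      simp only [List.nil_append]
      rw [if_neg (by simpa using hNnil)]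
      have hofl : N.foldl PySem.Set.add PySem.Set.empty = PySem.Set.ofList N :=
        (PySem.Set.ofList_eq_foldl N).symm
      rw [hofl]
      have hmemN : ∀ x ∈ N, x ∈ adj.values.flatten ∧ x ∉ reach := by
        intro x hx
        rw [hNdef] at hx
        rcases fdd_mem hx with ⟨h1, h2⟩
        rcases List.mem_flatMap.1 h1 with ⟨g, _, hg⟩
        exact ⟨getD_subset_flatten adj g x hg, h2⟩
      have hpot := potB_drop adj (by rw [hNdef]; exact fdd_nodup _ _) hmemN
      have hlen : 0 < N.length := List.length_pos_of_ne_nil hNnil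
      have hal := apps_len adj qRaw reach
      rw [hlink] at hal
      have hres : reach ++ N = reach ++ N := rfl
      have := ih reach N (apps adj reach qRaw) (ly.insert (L + 1) (PySem.Set.ofList N)) (L + 1)
        (fA - qRaw.length) (by omega)
        (by
          intro x hx y hy
          rcases List.mem_append.1 hx with hx | hx
          · exact List.mem_append_left _ (hcl x hx y hy)
          · have hyf : y ∈ fr.flatMap (fun g => adj.getD g PySem.Set.empty) :=
              List.mem_flatMap.2 ⟨x, hx, hy⟩
            rcases fdd_covers (vis := reach) hyf with hv | hf
            · exact List.mem_append_left _ hv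
            · exact List.mem_append_right _ hf)
        (by
          have := appsLink adj qRaw reach (reach ++ N) (by rw [hlink]; exact fun y h => h)
          rw [hlink] at this
          exact this)
        (by
          intro k hk
          rcases (PySem.Dict.mem_keys_insert _ _ _ _).1 hk with rfl | hk'
          · omega
          · have := hKeys k hk'
            omega)
        (by omega)
        (by omega)
      exact this

lemma vsum_bound (edges : List (String × String)) :
    vsum (pvBuildAdjs edges).1.items ≤ edges.length ∧ vsum (pvBuildAdjs edges).2.items ≤ edges.length := by
  have := build_inv edges PySem.Dict.empty PySem.Dict.empty
    PySem.Dict.nodup_keys_empty PySem.Dict.nodup_keys_empty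
  rcases this with ⟨_, _, h3, h4⟩
  constructor
  · simpa [pvBuildAdjs, vsum, PySem.Dict.empty] using h3
  · simpa [pvBuildAdjs, vsum, PySem.Dict.empty] using h4

lemma main_eq (adj : PySem.Dict String (PySem.Set String)) (seed : String) (E : Nat)
    (hv : vsum adj.items ≤ E) :
    pvBfsA adj (E + 1) PySem.Dict.empty PySem.Set.empty [(seed, 0)] =
    pvClosure adj (E + 2) PySem.Dict.empty [seed] 0 := by
  have hadd : PySem.Set.add ([] : List String) seed = [seed] := rfl
  rw [pvBfsA]
  simp only [PySem.Set.contains_eq_listContains, List.contains_eq_mem, PySem.Set.empty,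
    List.not_mem_nil, decide_false, Bool.false_eq_true, if_false]
  rw [if_neg (by norm_num), hadd]
  simp only [List.nil_append]
  have h3 : potA adj [] = vsum adj.items := by
    simp [potA]
  have h4 : adj.values.flatten.length = vsum adj.items := by
    simp [vsum, List.length_flatten, PySem.Dict.values, Function.comp_def]
  refine outer adj (E + 2) [] [seed] _ PySem.Dict.empty 0 E (by norm_num)
    (by intro x hx; simp at hx) ?_ (by simp [PySem.Dict.keys_empty]) ?_ ?_
  · simp only [List.nil_append, List.flatMap_cons, List.flatMap_nil, List.append_nil]
    apply fdd_filter
    intro d _ hd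
    simp only [PySem.Set.contains_eq_listContains, List.contains_eq_mem, Bool.not_eq_false',
      decide_eq_true_eq, List.mem_singleton] at hd
    simp [hd]
  · have h2 := potA_step adj (x := seed) [] (by simp)
    rw [List.nil_append] at h2
    have hc : adj.getD seed PySem.Set.empty = adj.getD seed ([] : PySem.Set String) := rfl
    rw [hc] at h2
    have h5 := List.length_filter_le
      (fun d => !decide (d ∈ [seed])) (adj.getD seed ([] : PySem.Set String))
    simp only [List.nil_append]
    omega
  · have h5 := List.length_filter_le (fun x => !([seed].contains x)) (PySem.Set.ofList adj.values.flatten)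
    have h6 := PySem.Set.length_ofList_le adj.values.flatten
    have : potB adj [seed] ≤ adj.values.flatten.length := le_trans h5 h6
    simp only [List.nil_append]
    omega

-- ===== VERDICT (by name: the statement is the Claim_ definition above) =====
theorem calculate_ancestor_descendant_layers_spec : Claim_equal_calculate_ancestor_descendant_layers := by
  intro seed nodes edges _
  unfold Spec_calculate_ancestor_descendant_layers
  unfold calculate_ancestor_descendant_layers calculate_ancestor_descendant_layers_alt
  have h := vsum_bound edges
  exact Prod.ext (congrArg PySem.Dict.items (main_eq _ seed edges.length h.2))
                 (congrArg PySem.Dict.items (main_eq _ seed edges.length h.1))
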